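-- pv_equiv track=rewrite | github.com/Karzhen/digitalTwin | MGM7 (2)/utills.py | compareByte
-- ===== SOURCE A (Python) =====
-- def getBit(byte: int, ind: int) -> bool:
--     return ((byte & (1 << (7 - ind))) >> (7 - ind)) and True
--
-- def compareByte(b1: int, b2: int) -> (str,str):
--     s = ""
--     for i in range(8):
--         d1 = getBit(b1, i)
--         d2 = getBit(b2, i)
--
--         if d1 != d2:
--             s += str(int(d2))
--         else:
--             s += "-"
--     return s
-- ===== SOURCE B (Python) =====
-- def compareByte(b1: int, b2: int) -> (str, str):
--     s1 = format(b1 & 0xFF, '08b')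
--     s2 = format(b2 & 0xFF, '08b')
--     return ''.join(c2 if c1 != c2 else '-' for c1, c2 in zip(s1, s2))
-- ===== Notes on version B (the rewrite author's own statement) =====
-- stated objective: idiomatic
-- what changed: Replaced the per-index mask/shift getBit loop with rendering both low bytes as 8-character binary strings (format(b & 0xFF, '08b')) and comparing them character-pairwise via zip in a joined comprehension.
import Mathlib
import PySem

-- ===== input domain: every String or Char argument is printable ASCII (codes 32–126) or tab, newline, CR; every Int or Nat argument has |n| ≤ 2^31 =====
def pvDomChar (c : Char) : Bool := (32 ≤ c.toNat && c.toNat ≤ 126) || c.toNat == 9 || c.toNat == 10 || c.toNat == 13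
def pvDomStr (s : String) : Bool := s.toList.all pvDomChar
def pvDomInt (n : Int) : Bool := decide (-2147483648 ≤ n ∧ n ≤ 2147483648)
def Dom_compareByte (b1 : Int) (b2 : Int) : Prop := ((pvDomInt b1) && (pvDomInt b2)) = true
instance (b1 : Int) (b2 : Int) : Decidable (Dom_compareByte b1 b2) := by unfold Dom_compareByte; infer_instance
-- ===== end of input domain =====

-- B replaces A's per-bit mask/shift loop by two 8-char binary string renderings (format(b & 0xFF, '08b'))
-- compared pairwise with zip — objective: idiomatic; same cost, no speed claim.

-- ===== PORT A =====
-- Python getBit returns 0 or True ('x and True'); its truthiness — the only thing A uses —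
-- is exactly 'the masked, shifted value ≠ 0', ported as a Bool.
def getBit (byte : Int) (ind : Int) : Bool :=
  ((PySem.Int.band byte ((1:Int) <<< (7 - ind).toNat)) >>> (7 - ind).toNat) != 0

-- the loop builds the string by += ; ported as a List Char accumulator, String.mk at return.
-- str(int(d2)) is '1' for True and '0' for 0.
def compareByte (b1 : Int) (b2 : Int) : String :=
  String.mk ((PySem.List.pyRange 0 8 1).foldl (fun s i =>
    let d1 := getBit b1 i
    let d2 := getBit b2 i
    if d1 != d2 then s ++ [if d2 then '1' else '0'] else s ++ ['-']) [])

-- ===== PORT B =====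
-- hand port of format(n, '08b') (exact for 0 ≤ n < 256, the only values B feeds it):
-- the 8 binary digits MSB first.
def bin8 (n : Int) : List Char :=
  (List.range 8).map (fun i => if n.toNat.testBit (7 - i) then '1' else '0')

def compareByte_alt (b1 : Int) (b2 : Int) : String :=
  String.mk (List.zipWith (fun c1 c2 => if c1 != c2 then c2 else '-')
    (bin8 (PySem.Int.band b1 255)) (bin8 (PySem.Int.band b2 255)))

-- ===== PRECONDITION & SPEC =====
def Spec_compareByte (b1 : Int) (b2 : Int) (out : String) : Prop := out = compareByte_alt b1 b2
instance (b1 : Int) (b2 : Int) (out : String) : Decidable (Spec_compareByte b1 b2 out) := by unfold Spec_compareByte; infer_instance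

-- ===== CLAIM (what is proved, stated in full; the proofs are below) =====
def Claim_equal_compareByte : Prop := ∀ (b1 : Int) (b2 : Int), Dom_compareByte b1 b2 → Spec_compareByte b1 b2 (compareByte b1 b2)

-- ===== LEMMAS AND PROOFS =====

-- the (k<8)-th bit test of A, in Nat, equals the k-th bit of the low byte
lemma natbit (m k : Nat) (hk : k < 8) :
    (((m &&& 2^k) >>> k) != 0) = (m &&& 255).testBit k := by
  have h1 : m &&& 255 = m % 2^8 := by
    have := Nat.and_two_pow_sub_one_eq_mod m 8; norm_num at this; exact this
  rw [h1, Nat.testBit_mod_two_pow, Nat.and_two_pow]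
  rcases h : m.testBit k with _ | _ <;> simp [hk, Nat.shiftRight_eq_div_pow]

-- 8-bit complement flips every low bit (finite check)
set_option maxRecDepth 8000 in
lemma compl8 : ∀ x < 256, ∀ k < 8, (255 - x : Nat).testBit k = !x.testBit k := by decide

lemma band_ofNat (m n : Nat) :
    PySem.Int.band (Int.ofNat m) (Int.ofNat n) = Int.ofNat (m &&& n) := by
  simp [PySem.Int.band]

lemma band_negSucc (m n : Nat) :
    PySem.Int.band (Int.negSucc m) (Int.ofNat n) = Int.ofNat (n - (n &&& m)) := by
  simp [PySem.Int.band]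

-- A's bit test of any Int equals the corresponding bit of its low byte b & 255
lemma bitA (b : Int) (k : Nat) (hk : k < 8) :
    ((PySem.Int.band b ((1:Int) <<< k)) >>> k != 0) = (PySem.Int.band b 255).toNat.testBit k := by
  have hp : (1:Int) <<< k = Int.ofNat (2^k) := by simp [Int.shiftLeft_eq]
  have h255 : (255 : Int) = Int.ofNat 255 := rfl
  have hshr : ∀ n : Nat, (Int.ofNat n) >>> k = Int.ofNat (n >>> k) := fun n => rfl
  rw [hp, h255]
  cases b with
  | ofNat m =>
      rw [band_ofNat, band_ofNat, hshr,
        show (Int.ofNat (m &&& 255)).toNat = m &&& 255 from rfl, ← natbit m k hk]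
      rcases h : (m &&& 2^k) >>> k with _|n <;> simp <;> omega
  | negSucc m =>
      rw [band_negSucc, band_negSucc]
      have hand : 2^k &&& m = (m.testBit k).toNat * 2^k := by
        rw [Nat.land_comm]; exact Nat.and_two_pow m k
      have hand255 : 255 &&& m = m % 2^8 := by
        rw [Nat.land_comm]
        have := Nat.and_two_pow_sub_one_eq_mod m 8; norm_num at this; exact this
      rw [hand, hand255]
      have hrhs : (Int.ofNat (255 - m % 2^8)).toNat.testBit k = !m.testBit k := by
        have hlt : m % 2^8 < 256 := Nat.mod_lt _ (by norm_num)
        have := compl8 (m % 2^8) hlt k hk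
        rw [Nat.testBit_mod_two_pow] at this
        simpa [hk] using this
      rw [hrhs]
      have hcast : ((2:Int)^k) = Int.ofNat (2^k) := by simp
      rcases h : m.testBit k with _|_
      · simp
        rw [hcast, hshr, Nat.shiftRight_eq_div_pow, Nat.div_self (Nat.two_pow_pos k)]
        simp
      · simp

lemma getBit_eq (b i : Int) (h0 : 0 ≤ i) (h8 : i < 8) :
    getBit b i = (PySem.Int.band b 255).toNat.testBit (7 - i).toNat := by
  unfold getBit
  exact bitA b (7 - i).toNat (by omega)

-- the per-position characters of A and B agree, as a function of the two bits
lemma chr (d1 d2 : Bool) :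
    (if (d1 != d2) = true then (if d2 = true then '1' else '0') else '-')
    = (if ((if d1 = true then '1' else '0') != (if d2 = true then '1' else '0')) = true
       then (if d2 = true then '1' else '0') else '-') := by
  cases d1 <;> cases d2 <;> rfl

theorem main_eq (b1 b2 : Int) : compareByte b1 b2 = compareByte_alt b1 b2 := by
  unfold compareByte compareByte_alt bin8
  have hb : (fun (s : List Char) (i : Int) =>
      let d1 := getBit b1 i
      let d2 := getBit b2 i
      if d1 != d2 then s ++ [if d2 then '1' else '0'] else s ++ ['-'])
      = fun s i => s ++ [if getBit b1 i != getBit b2 i then (if getBit b2 i then '1' else '0') else '-'] := by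
    funext s i
    by_cases h : (getBit b1 i != getBit b2 i) = true <;> simp [h]
  rw [hb, PySem.List.foldl_append_singleton_eq_map,
      show PySem.List.pyRange 0 8 1 = [0,1,2,3,4,5,6,7] from by decide,
      show List.range 8 = [0,1,2,3,4,5,6,7] from by decide]
  simp only [List.map, List.zipWith, List.nil_append]
  rw [getBit_eq b1 0 (by omega) (by omega), getBit_eq b2 0 (by omega) (by omega),
      getBit_eq b1 1 (by omega) (by omega), getBit_eq b2 1 (by omega) (by omega),
      getBit_eq b1 2 (by omega) (by omega), getBit_eq b2 2 (by omega) (by omega),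
      getBit_eq b1 3 (by omega) (by omega), getBit_eq b2 3 (by omega) (by omega),
      getBit_eq b1 4 (by omega) (by omega), getBit_eq b2 4 (by omega) (by omega),
      getBit_eq b1 5 (by omega) (by omega), getBit_eq b2 5 (by omega) (by omega),
      getBit_eq b1 6 (by omega) (by omega), getBit_eq b2 6 (by omega) (by omega),
      getBit_eq b1 7 (by omega) (by omega), getBit_eq b2 7 (by omega) (by omega)]
  simp only [show ((7:Int)-0).toNat = 7 from by decide, show ((7:Int)-1).toNat = 6 from by decide,
    show ((7:Int)-2).toNat = 5 from by decide, show ((7:Int)-3).toNat = 4 from by decide,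
    show ((7:Int)-4).toNat = 3 from by decide, show ((7:Int)-5).toNat = 2 from by decide,
    show ((7:Int)-6).toNat = 1 from by decide, show ((7:Int)-7).toNat = 0 from by decide,
    show (7:Nat)-0 = 7 from by decide, show (7:Nat)-1 = 6 from by decide,
    show (7:Nat)-2 = 5 from by decide, show (7:Nat)-3 = 4 from by decide,
    show (7:Nat)-4 = 3 from by decide, show (7:Nat)-5 = 2 from by decide,
    show (7:Nat)-6 = 1 from by decide, show (7:Nat)-7 = 0 from by decide,
    chr]

-- ===== VERDICT (by name: the statement is the Claim_ definition above) =====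
theorem compareByte_spec : Claim_equal_compareByte := by
  intro b1 b2 _
  unfold Spec_compareByte
  exact main_eq b1 b2
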